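-- pv_equiv track=rewrite | github.com/allenai/DecomP | src/decomp/inference/participant_qa.py | sort_without_duplicates
-- ===== SOURCE A (Python) =====
-- def sort_without_duplicates(arr):
--     last_val = None
--     output_arr = []
--     for (key, val) in sorted(arr, key=lambda x: x[1]):
--         if val == last_val:
--             continue
--         else:
--             output_arr.append((key, val))
--             last_val = val
--     return output_arr
-- ===== SOURCE B (Python) =====
-- def sort_without_duplicates(arr):
--     first = {}
--     for key, val in arr:
--         if val not in first:
--             first[val] = (key, val)
--     return sorted(first.values(), key=lambda x: x[1])
-- ===== Notes on version B (the rewrite author's own statement) =====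
-- stated objective: alternative
-- what changed: Instead of sorting the whole list and then dropping adjacent duplicate values, B makes one linear pass building a dict that keeps only the first pair seen for each value, and then sorts just the deduplicated pairs by value.
import Mathlib
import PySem

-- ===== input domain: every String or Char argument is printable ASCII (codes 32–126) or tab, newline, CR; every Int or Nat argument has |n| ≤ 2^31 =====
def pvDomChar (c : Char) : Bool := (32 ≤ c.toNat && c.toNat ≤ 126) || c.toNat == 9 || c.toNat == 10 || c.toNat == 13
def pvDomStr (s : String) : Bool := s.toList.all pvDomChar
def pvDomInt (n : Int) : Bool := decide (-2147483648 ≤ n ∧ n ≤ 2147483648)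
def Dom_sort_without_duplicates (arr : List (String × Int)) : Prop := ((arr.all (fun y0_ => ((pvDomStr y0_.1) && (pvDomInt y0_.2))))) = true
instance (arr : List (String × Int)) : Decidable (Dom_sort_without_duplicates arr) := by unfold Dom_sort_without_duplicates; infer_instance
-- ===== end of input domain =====

-- B builds a first-occurrence-per-value dict in one pass and sorts only the deduplicated
-- pairs, instead of A's sort-everything-then-drop-adjacent-duplicates; equal return values.

-- ===== PORT A =====
-- loop state: (last_val, output_arr)
def sort_without_duplicates (arr : List (String × Int)) : List (String × Int) :=
  ((PySem.List.sorted arr (fun x => x.2)).foldl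
    (fun (st : Option Int × List (String × Int)) kv =>
      if st.1 = some kv.2 then st else (some kv.2, st.2 ++ [kv]))
    (none, [])).2

-- ===== PORT B =====
-- first[val] = (key, val) only when val not yet a key; then sorted(first.values(), key=x[1])
def sort_without_duplicates_alt (arr : List (String × Int)) : List (String × Int) :=
  PySem.List.sorted
    (arr.foldl (fun (d : PySem.Dict Int (String × Int)) kv =>
      if d.contains kv.2 then d else d.insert kv.2 kv) PySem.Dict.empty).values
    (fun x => x.2)

-- ===== PRECONDITION & SPEC =====
def Spec_sort_without_duplicates (arr : List (String × Int)) (out : List (String × Int)) : Prop := out = sort_without_duplicates_alt arr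
instance (arr : List (String × Int)) (out : List (String × Int)) : Decidable (Spec_sort_without_duplicates arr out) := by unfold Spec_sort_without_duplicates; infer_instance

-- ===== CLAIM (what is proved, stated in full; the proofs are below) =====
def Claim_equal_sort_without_duplicates : Prop := ∀ (arr : List (String × Int)), Dom_sort_without_duplicates arr → Spec_sort_without_duplicates arr (sort_without_duplicates arr)

-- ===== LEMMAS AND PROOFS =====

-- first occurrence of each value, in encounter order (proof-only helper)
def pvFO : List (String × Int) → List (String × Int)
  | [] => []
  | x :: t => x :: pvFO (t.filter (fun y => !(y.2 == x.2)))
termination_by l => l.length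
decreasing_by
  simp only [List.length_unattach, List.length_cons]
  exact Nat.lt_succ_of_le (le_trans (List.length_filter_le _ _) (by simp))

theorem pvFO_cons (x : String × Int) (t : List (String × Int)) :
    pvFO (x :: t) = x :: pvFO (t.filter (fun y => !(y.2 == x.2))) := by rw [pvFO]

theorem pvFO_induction {P : List (String × Int) → Prop} (h1 : P [])
    (h2 : ∀ x t, P (t.filter (fun y => !(y.2 == x.2))) → P (x :: t)) : ∀ l, P l := by
  have key : ∀ n (l : List (String × Int)), l.length ≤ n → P l := by
    intro n
    induction n with
    | zero => intro l h; cases l with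
      | nil => exact h1
      | cons x t => simp at h
    | succ n ih =>
      intro l h
      cases l with
      | nil => exact h1
      | cons x t =>
        refine h2 x t (ih _ ?_)
        simp only [List.length_cons] at h
        exact le_trans (List.length_filter_le _ _) (by omega)
  exact fun l => key l.length l le_rfl

theorem pvFO_sub : ∀ (l : List (String × Int)), ∀ y ∈ pvFO l, y ∈ l := by
  refine pvFO_induction (by simp [pvFO]) ?_
  intro x t ih y hy
  rw [pvFO_cons] at hy
  rcases List.mem_cons.1 hy with h | h
  · simp [h]
  · exact List.mem_cons_of_mem _ (List.mem_of_mem_filter (ih y h))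

theorem pvFO_val_ne : ∀ (l : List (String × Int)), (pvFO l).Pairwise (fun a b => a.2 ≠ b.2) := by
  refine pvFO_induction (by simp [pvFO]) ?_
  intro x t ih
  rw [pvFO_cons]
  refine List.pairwise_cons.2 ⟨?_, ih⟩
  intro y hy
  have hm := List.mem_filter.1 (pvFO_sub _ y hy)
  have hne : y.2 ≠ x.2 := by simpa using hm.2
  exact fun he => hne he.symm

theorem pvFO_nodup (l : List (String × Int)) : (pvFO l).Nodup := by
  exact (pvFO_val_ne l).imp (fun h he => h (by rw [he]))

theorem pvFO_pairwise : ∀ (l : List (String × Int)), l.Pairwise (fun a b => a.2 ≤ b.2) →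
    (pvFO l).Pairwise (fun a b => a.2 < b.2) := by
  refine pvFO_induction (by simp [pvFO]) ?_
  intro x t ih hp
  rw [pvFO_cons]
  rcases List.pairwise_cons.1 hp with ⟨hx, ht⟩
  refine List.pairwise_cons.2 ⟨?_, ih (ht.filter _)⟩
  intro y hy
  have hm := List.mem_filter.1 (pvFO_sub _ y hy)
  have hne : y.2 ≠ x.2 := by simpa using hm.2
  exact lt_of_le_of_ne (hx y hm.1) hne.symm

theorem find?_filter_of_imp {α : Type} (p q : α → Bool) (h : ∀ z, p z = true → q z = true) :
    ∀ t : List α, (t.filter q).find? p = t.find? p := by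
  intro t
  induction t with
  | nil => rfl
  | cons a t ih =>
    by_cases hq : q a = true
    · rw [List.filter_cons_of_pos hq]
      by_cases hp : p a = true
      · rw [List.find?_cons_of_pos hp, List.find?_cons_of_pos hp]
      · rw [List.find?_cons_of_neg hp, List.find?_cons_of_neg hp, ih]
    · rw [List.filter_cons_of_neg hq, ih,
        List.find?_cons_of_neg (fun hp => hq (h a hp))]

theorem mem_pvFO_iff : ∀ (l : List (String × Int)), ∀ (y : String × Int),
    (y ∈ pvFO l ↔ l.find? (fun z => z.2 == y.2) = some y) := by
  refine pvFO_induction (by simp [pvFO]) ?_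
  intro x t ih y
  rw [pvFO_cons]
  by_cases hxy : x.2 = y.2
  · rw [show List.find? (fun z => z.2 == y.2) (x :: t) = some x from
      List.find?_cons_of_pos (by simpa using hxy)]
    constructor
    · intro h
      rcases List.mem_cons.1 h with h | h
      · rw [h]
      · exfalso
        have hm := List.mem_filter.1 (pvFO_sub _ y h)
        exact (show y.2 ≠ x.2 by simpa using hm.2) hxy.symm
    · intro h
      rw [← Option.some_inj.1 h]
      exact List.mem_cons_self
  · rw [show List.find? (fun z => z.2 == y.2) (x :: t) = List.find? (fun z => z.2 == y.2) t from
      List.find?_cons_of_neg (by simpa using hxy)]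
    have hfil : (t.filter (fun z => !(z.2 == x.2))).find? (fun z => z.2 == y.2)
        = t.find? (fun z => z.2 == y.2) := by
      refine find?_filter_of_imp _ _ ?_ t
      intro z hz
      have : z.2 = y.2 := by simpa using hz
      simp [this]
      omega
    rw [← hfil, ← ih y]
    constructor
    · intro h
      rcases List.mem_cons.1 h with h | h
      · exact absurd (congrArg Prod.snd h).symm hxy
      · exact h
    · exact fun h => List.mem_cons_of_mem _ h
theorem loopA_go : ∀ (s : List (String × Int)) (v : Int) (acc : List (String × Int)),
    s.Pairwise (fun a b => a.2 ≤ b.2) → (∀ y ∈ s, v ≤ y.2) →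
    (s.foldl (fun (st : Option Int × List (String × Int)) kv =>
      if st.1 = some kv.2 then st else (some kv.2, st.2 ++ [kv])) (some v, acc)).2
    = acc ++ pvFO (s.filter (fun y => !(y.2 == v))) := by
  intro s
  induction s with
  | nil => intro v acc _ _; simp [pvFO]
  | cons x t ih =>
    intro v acc hp hb
    rcases List.pairwise_cons.1 hp with ⟨hx, ht⟩
    by_cases hxv : x.2 = v
    · rw [List.foldl_cons]
      rw [if_pos (by rw [hxv])]
      rw [List.filter_cons_of_neg (by simpa using hxv)]
      exact ih v acc ht (fun y hy => hb y (List.mem_cons_of_mem _ hy))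
    · rw [List.foldl_cons, if_neg (by simpa [eq_comm] using hxv)]
      rw [ih x.2 (acc ++ [x]) ht hx]
      rw [List.filter_cons_of_pos (by simpa using hxv)]
      rw [pvFO_cons]
      have hvlt : v < x.2 := lt_of_le_of_ne (hb x List.mem_cons_self) (fun h => hxv h.symm)
      have h1 : t.filter (fun y => !(y.2 == v)) = t := by
        refine List.filter_eq_self.2 ?_
        intro y hy
        have : x.2 ≤ y.2 := hx y hy
        simp; omega
      have h2 : (t.filter (fun y => !(y.2 == v))).filter (fun y => !(y.2 == x.2))
          = t.filter (fun y => !(y.2 == x.2)) := by rw [h1]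
      simp [h2]
theorem loopA (s : List (String × Int)) (hs : s.Pairwise (fun a b => a.2 ≤ b.2)) :
    (s.foldl (fun (st : Option Int × List (String × Int)) kv =>
      if st.1 = some kv.2 then st else (some kv.2, st.2 ++ [kv])) (none, [])).2 = pvFO s := by
  cases s with
  | nil => simp [pvFO]
  | cons x t =>
    rcases List.pairwise_cons.1 hs with ⟨hx, ht⟩
    rw [List.foldl_cons, if_neg (by simp)]
    rw [loopA_go t x.2 ([] ++ [x]) ht hx, pvFO_cons]
    simp

theorem dict_loop : ∀ (l : List (String × Int)) (d : PySem.Dict Int (String × Int)),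
    (l.foldl (fun (d : PySem.Dict Int (String × Int)) kv =>
      if d.contains kv.2 then d else d.insert kv.2 kv) d).values
    = d.values ++ pvFO (l.filter (fun y => !(d.contains y.2))) := by
  intro l
  induction l with
  | nil => intro d; simp [pvFO]
  | cons x t ih =>
    intro d
    by_cases hc : d.contains x.2 = true
    · rw [List.foldl_cons, if_pos hc, List.filter_cons_of_neg (by simp [hc]), ih]
    · rw [List.foldl_cons, if_neg hc, ih, List.filter_cons_of_pos (by simp [hc]), pvFO_cons]
      have hval : (d.insert x.2 x).values = d.values ++ [x] := by
        simp [PySem.Dict.insert, hc, PySem.Dict.values]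
      have hcon : ∀ v : Int, (d.insert x.2 x).contains v = (d.contains v || (x.2 == v)) := by
        intro v
        simp only [PySem.Dict.insert, PySem.Dict.contains] at hc ⊢
        rw [if_neg hc]
        simp [List.any_append]
      have hfil : t.filter (fun y => !((d.insert x.2 x).contains y.2))
          = (t.filter (fun y => !(d.contains y.2))).filter (fun y => !(y.2 == x.2)) := by
        rw [List.filter_filter]
        refine List.filter_congr ?_
        intro y _
        rw [hcon y.2]
        cases hdy : d.contains y.2 <;> by_cases hyx : y.2 = x.2 <;> simp [hyx, BEq.comm]
      rw [hfil, hval]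
      simp
theorem insertBy_filter (x : String × Int) (v : Int) : ∀ (ys : List (String × Int)),
    ys.Pairwise (fun a b => a.2 ≤ b.2) →
    (PySem.List.insertBy (fun a b => decide (a.2 < b.2)) x ys).filter (fun y => y.2 == v)
    = if x.2 == v then ys.filter (fun y => y.2 == v) ++ [x] else ys.filter (fun y => y.2 == v) := by
  intro ys
  induction ys with
  | nil =>
    intro _
    by_cases hxv : x.2 = v <;> simp [PySem.List.insertBy, hxv]
  | cons y t ih =>
    intro hp
    rcases List.pairwise_cons.1 hp with ⟨hy, ht⟩
    rw [show PySem.List.insertBy (fun a b => decide (a.2 < b.2)) x (y :: t)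
        = if x.2 < y.2 then x :: y :: t else y :: PySem.List.insertBy (fun a b => decide (a.2 < b.2)) x t by
      simp [PySem.List.insertBy]]
    by_cases hlt : x.2 < y.2
    · rw [if_pos hlt]
      by_cases hxv : x.2 = v
      · have hnil : (y :: t).filter (fun y => y.2 == v) = [] := by
          refine List.filter_eq_nil_iff.2 ?_
          intro z hz
          rcases List.mem_cons.1 hz with rfl | hz
          · simp; omega
          · have := hy z hz; simp; omega
        rw [List.filter_cons_of_pos (by simpa using hxv), hnil]
        simp [hxv]
      · rw [List.filter_cons_of_neg (by simpa using hxv), if_neg (by simpa using hxv)]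
    · rw [if_neg hlt]
      by_cases hyv : y.2 = v
      · rw [List.filter_cons_of_pos (by simpa using hyv), ih ht,
          List.filter_cons_of_pos (by simpa using hyv)]
        by_cases hxv : x.2 = v <;> simp [hxv]
      · rw [List.filter_cons_of_neg (by simpa using hyv), ih ht,
          List.filter_cons_of_neg (by simpa using hyv)]

theorem sorted_filter_stable (arr : List (String × Int)) (v : Int) :
    (PySem.List.sorted arr (fun x => x.2)).filter (fun y => y.2 == v)
    = arr.filter (fun y => y.2 == v) := by
  induction arr using List.reverseRecOn with
  | nil => rfl
  | append_singleton l x ih =>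
    have hstep : PySem.List.sorted (l ++ [x]) (fun x => x.2)
        = PySem.List.insertBy (fun a b => decide (a.2 < b.2)) x (PySem.List.sorted l (fun x => x.2)) := by
      rw [PySem.List.sorted_eq_foldl_insertBy, PySem.List.sorted_eq_foldl_insertBy, List.foldl_append]
      rfl
    rw [hstep, insertBy_filter x v _ (PySem.List.sorted_pairwise l _), List.filter_append, ih]
    by_cases hxv : x.2 = v <;> simp [hxv]

theorem find?_stable (arr : List (String × Int)) (v : Int) :
    (PySem.List.sorted arr (fun x => x.2)).find? (fun y => y.2 == v)
    = arr.find? (fun y => y.2 == v) := by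
  rw [← List.head?_filter, ← List.head?_filter, sorted_filter_stable]

theorem pvFO_perm (arr : List (String × Int)) :
    (pvFO (PySem.List.sorted arr (fun x => x.2))).Perm (pvFO arr) := by
  rw [List.perm_ext_iff_of_nodup (pvFO_nodup _) (pvFO_nodup _)]
  intro y
  rw [mem_pvFO_iff _ y, mem_pvFO_iff _ y, find?_stable]

-- ===== VERDICT (by name: the statement is the Claim_ definition above) =====
theorem sort_without_duplicates_spec : Claim_equal_sort_without_duplicates := by
  intro arr _
  unfold Spec_sort_without_duplicates sort_without_duplicates sort_without_duplicates_alt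
  rw [loopA _ (PySem.List.sorted_pairwise arr _), dict_loop]
  have hfil : arr.filter (fun y => !((PySem.Dict.empty (κ := Int) (ν := String × Int)).contains y.2)) = arr := by
    simp [PySem.Dict.empty, PySem.Dict.contains]
  rw [hfil]
  have hemp : (PySem.Dict.empty (κ := Int) (ν := String × Int)).values = [] := rfl
  rw [hemp, List.nil_append]
  exact (PySem.List.sorted_eq_of_perm_of_pairwise_lt _ _ _ (pvFO_perm arr)
    (pvFO_pairwise _ (PySem.List.sorted_pairwise arr _))).symm
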